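-- pv_equiv track=rewrite | github.com/Rithvik09/NBA-Player-Props-Analyzer | scripts/train_models.py | _walk_forward_splits
-- ===== SOURCE A (Python) =====
-- def _walk_forward_splits(n: int, min_train: int = 200, n_folds: int = 5) -> list[tuple[int, int]]:
--     if n <= (min_train + 50):
--         return []
--     test_size = max(50, int(n * 0.10))
--     splits: list[tuple[int, int]] = []
--     train_end = min_train
--     while train_end + test_size <= n and len(splits) < n_folds:
--         splits.append((train_end, train_end + test_size))
--         train_end += test_size
--     return splits
-- ===== SOURCE B (Python) =====
-- def _walk_forward_splits(n: int, min_train: int = 200, n_folds: int = 5) -> list[tuple[int, int]]: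
--     if n <= (min_train + 50):
--         return []
--     test_size = max(50, int(n * 0.10))
--     # boundary points of the windows (lazy range slicing), then pair adjacent boundaries
--     bounds = range(min_train, n + 1, test_size)[: max(0, n_folds) + 1]
--     return list(zip(bounds, bounds[1:]))
-- ===== Notes on version B (the rewrite author's own statement) =====
-- stated objective: alternative
-- what changed: Instead of A's while loop that accumulates (start, end) pairs with a running train_end and a len() test, B materialises the window boundary points as a lazily-sliced range object (range(min_train, n+1, test_size)[:max(0,n_folds)+1]) and forms the splits by zipping the boundary list with its own tail.
import Mathlib
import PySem

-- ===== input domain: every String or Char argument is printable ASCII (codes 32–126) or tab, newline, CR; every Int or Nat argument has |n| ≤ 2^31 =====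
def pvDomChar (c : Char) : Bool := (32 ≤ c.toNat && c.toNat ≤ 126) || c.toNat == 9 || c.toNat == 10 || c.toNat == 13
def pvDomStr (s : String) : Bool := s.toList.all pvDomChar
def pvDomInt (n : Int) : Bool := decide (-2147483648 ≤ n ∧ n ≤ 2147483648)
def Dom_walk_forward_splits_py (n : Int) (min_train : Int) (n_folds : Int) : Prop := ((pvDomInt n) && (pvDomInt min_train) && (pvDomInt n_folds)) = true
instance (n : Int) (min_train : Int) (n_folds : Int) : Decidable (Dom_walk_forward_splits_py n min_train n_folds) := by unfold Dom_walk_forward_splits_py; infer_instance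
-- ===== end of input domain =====

-- ===== PORT A =====
-- B changes: instead of A's while loop accumulating splits with a running train_end,
-- B materialises the list of window BOUNDARY points (a lazily-sliced range) and pairs
-- adjacent boundaries with zip (objective: alternative decomposition).
-- Python's `int(n * 0.10)` is a float computation; on the stated domain |n| <= 2^31 it equals
-- floor division n // 10 exactly (for n >= 0 double rounding never crosses an integer at this
-- magnitude, and for n < 0 both values are < 50 so the surrounding max(50, .) erases the
-- truncate-vs-floor difference), so it is ported by hand as PySem.Int.floordiv n 10.
def wfLoopA (n ts n_folds : Int) (train_end : Int) (splits : List (Int × Int)) : List (Int × Int) :=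
  if train_end + ts ≤ n ∧ (splits.length : Int) < n_folds then
    wfLoopA n ts n_folds (train_end + ts) (splits ++ [(train_end, train_end + ts)])
  else splits
termination_by (n_folds - splits.length).toNat
decreasing_by simp; omega

def walk_forward_splits_py (n : Int) (min_train : Int) (n_folds : Int) : List (Int × Int) :=
  if n ≤ min_train + 50 then []
  else
    let test_size := max 50 (PySem.Int.floordiv n 10)
    wfLoopA n test_size n_folds min_train []

-- ===== PORT B =====
-- range-object slicing r[:k] with k = max(0, n_folds) + 1 ≥ 0 is exact:
-- range(a, b, s)[:k] = range(a, min(b, a + k*s), s) for s > 0; ported by hand as the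
-- capped pyRange below (PySem has no lazy range object).
def walk_forward_splits_py_alt (n : Int) (min_train : Int) (n_folds : Int) : List (Int × Int) :=
  if n ≤ min_train + 50 then []
  else
    let test_size := max 50 (PySem.Int.floordiv n 10)
    let bounds := PySem.List.pyRange min_train
        (min (n + 1) (min_train + (max 0 n_folds + 1) * test_size)) test_size
    bounds.zip bounds.tail

-- ===== PRECONDITION & SPEC =====
def Spec_walk_forward_splits_py (n : Int) (min_train : Int) (n_folds : Int) (out : List (Int × Int)) : Prop := out = walk_forward_splits_py_alt n min_train n_folds
instance (n : Int) (min_train : Int) (n_folds : Int) (out : List (Int × Int)) : Decidable (Spec_walk_forward_splits_py n min_train n_folds out) := by unfold Spec_walk_forward_splits_py; infer_instance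

-- ===== CLAIM (what is proved, stated in full; the proofs are below) =====
def Claim_equal_walk_forward_splits_py : Prop := ∀ (n : Int) (min_train : Int) (n_folds : Int), Dom_walk_forward_splits_py n min_train n_folds → Spec_walk_forward_splits_py n min_train n_folds (walk_forward_splits_py n min_train n_folds)

-- ===== LEMMAS AND PROOFS =====

-- A's while loop produces exactly the arithmetic family of windows
lemma wfLoopA_eq (n ts nf : Int) (hts : 0 < ts) :
    ∀ (c : Nat) (te : Int) (acc : List (Int × Int)),
    c = (min (nf - acc.length) (PySem.Int.floordiv (n - te) ts)).toNat →
    wfLoopA n ts nf te acc =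
      acc ++ (List.range c).map (fun i : Nat => (te + (i : Int) * ts, te + ((i : Int) + 1) * ts)) := by
  intro c
  induction c with
  | zero =>
    intro te acc hc
    rw [wfLoopA]
    rw [if_neg]
    · simp
    · intro ⟨h1, h2⟩
      have hdiv : 1 ≤ PySem.Int.floordiv (n - te) ts :=
        (PySem.Int.le_floordiv_iff_mul_le hts).mpr (by omega)
      omega
  | succ c ih =>
    intro te acc hc
    have hl : PySem.Int.floordiv (n - te) ts * ts ≤ n - te :=
      (PySem.Int.le_floordiv_iff_mul_le hts).mp le_rfl
    have hu : n - te < (PySem.Int.floordiv (n - te) ts + 1) * ts :=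
      (PySem.Int.floordiv_lt_iff_lt_mul hts).mp (by omega)
    have hdiv' : PySem.Int.floordiv (n - (te + ts)) ts = PySem.Int.floordiv (n - te) ts - 1 := by
      rw [PySem.Int.floordiv_eq_iff_of_pos hts]
      constructor
      · nlinarith
      · nlinarith
    have h1 : te + ts ≤ n := by
      by_contra h
      have : PySem.Int.floordiv (n - te) ts < 1 := by
        rw [PySem.Int.floordiv_lt_iff_lt_mul hts]; omega
      omega
    have h2 : (acc.length : Int) < nf := by omega
    rw [wfLoopA, if_pos ⟨h1, h2⟩,
        ih (te + ts) (acc ++ [(te, te + ts)]) (by simp [hdiv']; omega),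
        List.append_assoc]
    congr 1
    rw [List.range_succ_eq_map, List.map_cons, List.map_map, List.singleton_append]
    congr 1
    · norm_num
    · apply List.map_congr_left
      intro i _
      simp only [Function.comp, Prod.mk.injEq]
      push_cast
      constructor <;> ring

-- zipping a map-over-range with its tail pairs consecutive values
lemma zip_tail_map_range (m : Nat) (f : Nat → Int) :
    ((List.range (m + 1)).map f).zip (((List.range (m + 1)).map f).tail)
      = (List.range m).map (fun k => (f k, f (k + 1))) := by
  apply List.ext_getElem
  · simp
  · intro i h1 h2
    simp

theorem walk_forward_splits_py_spec : Claim_equal_walk_forward_splits_py := by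
  intro n mt nf _
  unfold Spec_walk_forward_splits_py walk_forward_splits_py walk_forward_splits_py_alt
  by_cases hg : n ≤ mt + 50
  · simp [hg]
  · simp only [if_neg hg]
    set ts : Int := max 50 (PySem.Int.floordiv n 10) with hts_def
    set q : Int := PySem.Int.floordiv (n - mt) ts with hq_def
    set c : Int := max 0 nf with hc_def
    set stop : Int := min (n + 1) (mt + (c + 1) * ts) with hstop_def
    have hts : 0 < ts := by rw [hts_def]; omega
    have hq0 : 0 ≤ q := by
      rw [hq_def]; exact (PySem.Int.le_floordiv_iff_mul_le hts).mpr (by omega)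
    have hql : q * ts ≤ n - mt := by
      rw [hq_def]; exact (PySem.Int.le_floordiv_iff_mul_le hts).mp le_rfl
    have hqu : n - mt < (q + 1) * ts := by
      rw [hq_def]
      exact (PySem.Int.floordiv_lt_iff_lt_mul hts).mp (lt_add_one _)
    have hc0 : 0 ≤ c := le_max_left _ _
    have hA := wfLoopA_eq n ts nf hts ((min nf q).toNat) mt []
      (by simp [hq_def])
    clear_value ts q c stop
    clear hq_def hts_def
    have hE : (stop - mt + ts - 1) / ts = min q c + 1 := by
      by_cases hcase : mt + (c + 1) * ts ≤ n + 1
      · have hmin : min q c = c := by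
          have : c * ts ≤ n - mt := by nlinarith
          have : c ≤ q := by nlinarith
          omega
        rw [hstop_def, min_eq_right hcase, hmin]
        apply le_antisymm
        · have := (Int.ediv_lt_iff_lt_mul (a := mt + (c + 1) * ts - mt + ts - 1)
            (b := c + 2) hts).mpr (by nlinarith)
          omega
        · exact (Int.le_ediv_iff_mul_le hts).mpr (by nlinarith)
      · have hcase' : n + 1 ≤ mt + (c + 1) * ts := le_of_not_ge hcase
        have hmin : min q c = q := by
          have : q < c + 1 := by nlinarith
          omega
        rw [hstop_def, min_eq_left hcase', hmin]
        apply le_antisymm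
        · have := (Int.ediv_lt_iff_lt_mul (a := n + 1 - mt + ts - 1)
            (b := q + 2) hts).mpr (by nlinarith)
          omega
        · exact (Int.le_ediv_iff_mul_le hts).mpr (by nlinarith)
    have hlt : mt < stop := by
      rw [hstop_def]
      exact lt_min (by omega) (by nlinarith)
    have hmin0 : 0 ≤ min q c := le_min hq0 hc0
    have hbounds : PySem.List.pyRange mt stop ts
        = (List.range ((min q c).toNat + 1)).map (fun k : Nat => mt + ts * k) := by
      rw [PySem.List.pyRange_of_pos mt stop hts, if_pos hlt, hE]
      obtain ⟨m, hm⟩ : ∃ m, min q c = m := ⟨_, rfl⟩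
      rw [hm] at hmin0 ⊢
      have hnat : (m + 1).toNat = m.toNat + 1 := by omega
      rw [hnat]
    rw [hA, List.nil_append, hbounds, zip_tail_map_range]
    have hcount : (min nf q).toNat = (min q c).toNat := by
      rcases le_total nf 0 with h | h
      · rw [hc_def, max_eq_left h, min_eq_right hq0, min_eq_left (le_trans h hq0)]
        omega
      · rw [hc_def, max_eq_right h, min_comm nf q]
    rw [hcount]
    apply List.map_congr_left
    intro k _
    simp only [Prod.mk.injEq]
    constructor <;> · push_cast; ring
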